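-- pv_equiv track=rewrite | github.com/KKKirino/Coding-Every-Day | 2020/study-algo-with-zyf/traverse-graph.py | count_islands_with_area
-- ===== SOURCE A (Python) =====
-- def count_islands_with_area(blocks):
--   if len(blocks) == 0 or len(blocks[0]) == 0:
--     return 0
--
--   rows, cols = len(blocks), len(blocks[0])
--   visited = [[0] * cols for i in range(rows)]
--   shared_var = [0]
--   res = []
--   for r in range(rows):
--     for c in range(cols):
--       if blocks[r][c] == '1' and visited[r][c] == 0:
--         shared_var[0] = 0
--         dfs_for_islands_with_area(blocks, visited, r, c, shared_var)
--         res.append(shared_var[0])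
--
--   return res
--
-- def dfs_for_islands_with_area(blocks, visited, r, c, shared_var):
--   if visited[r][c] or blocks[r][c] == '0': return 0
--
--   shared_var[0] += 1
--   visited[r][c] = 1
--   d = [[0, 1], [0, -1], [-1, 0], [1, 0]]
--   for dr, dc in d:
--     nr, nc = r + dr, c + dc
--     if nr >= len(blocks) or nr < 0 or nc >= len(blocks[0]) or nc < 0: continue
--     dfs_for_islands_with_area(blocks, visited, nr, nc, shared_var)
-- ===== SOURCE B (Python) =====
-- def count_islands_with_area(blocks):
--   if len(blocks) == 0 or len(blocks[0]) == 0: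
--     return 0
--   rows, cols = len(blocks), len(blocks[0])
--   seen = set()
--   res = []
--   for idx in range(rows * cols):
--     r, c = divmod(idx, cols)
--     if blocks[r][c] == '1' and (r, c) not in seen:
--       area = 0
--       stack = [(r, c)]
--       while stack:
--         cr, cc = stack.pop()
--         if (cr, cc) in seen or blocks[cr][cc] == '0':
--           continue
--         seen.add((cr, cc))
--         area += 1
--         if cr + 1 < rows: stack.append((cr + 1, cc))
--         if cr > 0: stack.append((cr - 1, cc))
--         if cc > 0: stack.append((cr, cc - 1))
--         if cc + 1 < cols: stack.append((cr, cc + 1))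
--       res.append(area)
--   return res
-- ===== Notes on version B (the rewrite author's own statement) =====
-- stated objective: alternative
-- what changed: Replaces the recursive DFS helper mutating a visited matrix and a shared area counter by an iterative explicit-stack flood fill over a visited SET of coordinates, seeded by a single flat index loop decoded with divmod instead of A's nested row/column loops; Pre_ excludes empty grids (no rows or empty first row), where A returns the int 0 instead of a list of areas, and ragged grids with a row shorter than the first row, where both raise IndexError.
-- outside the precondition, e.g. on count_islands_with_area([]): A returns 0, B returns 0; on count_islands_with_area([[]]): A returns 0, B returns 0
import Mathlib
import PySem

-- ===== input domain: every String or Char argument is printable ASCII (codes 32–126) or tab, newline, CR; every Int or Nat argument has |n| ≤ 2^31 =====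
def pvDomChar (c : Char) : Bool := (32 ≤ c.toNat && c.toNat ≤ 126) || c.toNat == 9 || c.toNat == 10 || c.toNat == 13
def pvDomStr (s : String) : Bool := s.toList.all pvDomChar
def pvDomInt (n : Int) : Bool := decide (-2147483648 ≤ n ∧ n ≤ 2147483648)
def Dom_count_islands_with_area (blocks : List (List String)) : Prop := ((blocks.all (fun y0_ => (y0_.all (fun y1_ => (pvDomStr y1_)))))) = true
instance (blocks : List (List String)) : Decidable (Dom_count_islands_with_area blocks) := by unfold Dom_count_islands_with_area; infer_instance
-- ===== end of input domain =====

-- B replaces A's recursive DFS over a visited MATRIX (and a shared mutable area counter) by an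
-- iterative explicit-stack flood fill over a visited SET of coordinates, seeded by a single flat
-- index loop (divmod) instead of A's nested row/column loops; objective: alternative, same cost.
-- Equivalence is about the RETURN value (neither Python mutates its argument `blocks`).

-- ===== PORT A =====
-- A reads visited[r][c] / blocks[r][c] only at in-range non-negative indices (callers guard them),
-- where these accessors are exactly Python indexing; the out-of-range defaults (1 = visited,
-- "0" = water) only make the Lean functions total and are never hit on inputs satisfying Pre_.
def vget (v : List (List Int)) (r c : Int) : Int :=
  if r < 0 ∨ c < 0 then 1 else ((v.getD r.toNat []).getD c.toNat 1)

def bget (blocks : List (List String)) (r c : Int) : String :=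
  if r < 0 ∨ c < 0 then "0" else ((blocks.getD r.toNat []).getD c.toNat "0")

-- visited[r][c] = 1
def mark (v : List (List Int)) (r c : Int) : List (List Int) :=
  v.set r.toNat ((v.getD r.toNat []).set c.toNat 1)

-- A's dfs_for_islands_with_area: the state (visited, shared_var[0]) is threaded explicitly;
-- fuel makes the recursion total (rows*cols+1 always suffices, see the proofs below).
def dfsF : Nat → List (List String) → List (List Int) → Int → Int → Int → List (List Int) × Int
  | 0, _, v, _, _, n => (v, n)
  | f+1, blocks, v, r, c, n =>
    if vget v r c ≠ 0 ∨ bget blocks r c = "0" then (v, n)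
    else
      [((0:Int),(1:Int)), (0,-1), (-1,0), (1,0)].foldl
        (fun (s : List (List Int) × Int) d =>
          let nr := r + d.1
          let nc := c + d.2
          if nr ≥ (blocks.length : Int) ∨ nr < 0 ∨ nc ≥ ((blocks.headD []).length : Int) ∨ nc < 0
          then s
          else dfsF f blocks s.1 nr nc s.2)
        (mark v r c, n + 1)

def count_islands_with_area (blocks : List (List String)) : List Int :=
  match blocks with
  | [] => []        -- Python returns the int 0 here; excluded by Pre_
  | h :: _ =>
    if h.length = 0 then [] else   -- Python returns the int 0 here; excluded by Pre_
      let rows := blocks.length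
      let cols := h.length
      let init : List (List Int) := List.replicate rows (List.replicate cols 0)
      ((PySem.List.pyRange 0 (rows : Int) 1).foldl
        (fun (st : List (List Int) × List Int) r =>
          (PySem.List.pyRange 0 (cols : Int) 1).foldl
            (fun st c =>
              if bget blocks r c = "1" ∧ vget st.1 r c = 0 then
                let p := dfsF (rows * cols + 1) blocks st.1 r c 0
                (p.1, st.2 ++ [p.2])
              else st)
            st)
        (init, [])).2

-- ===== PORT B =====
-- B reads blocks only at in-bounds cells (the divmod seed and the guarded pushes), where this
-- accessor is exactly Python indexing; the "0" default only totalises it.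
def cellAt (blocks : List (List String)) (p : Int × Int) : String :=
  if 0 ≤ p.1 ∧ 0 ≤ p.2 then (blocks.getD p.1.toNat []).getD p.2.toNat "0" else "0"

-- B's while-loop: pop the head, skip seen/water, else record the cell in the seen set and push
-- the in-bounds neighbours (down, up, left, right — so the top is right). Fuel totalises it.
def floodF : Nat → List (List String) → Int → Int → PySem.Set (Int × Int) → Int →
    List (Int × Int) → PySem.Set (Int × Int) × Int
  | 0, _, _, _, seen, area, _ => (seen, area)
  | _+1, _, _, _, seen, area, [] => (seen, area)
  | f+1, blocks, rows, cols, seen, area, p :: stk =>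
    if PySem.Set.contains seen p ∨ cellAt blocks p = "0" then
      floodF f blocks rows cols seen area stk
    else
      let s1 := if p.1 + 1 < rows then (p.1 + 1, p.2) :: stk else stk
      let s2 := if 0 < p.1 then (p.1 - 1, p.2) :: s1 else s1
      let s3 := if 0 < p.2 then (p.1, p.2 - 1) :: s2 else s2
      let s4 := if p.2 + 1 < cols then (p.1, p.2 + 1) :: s3 else s3
      floodF f blocks rows cols (PySem.Set.add seen p) (area + 1) s4

def count_islands_with_area_alt (blocks : List (List String)) : List Int :=
  if blocks.length = 0 ∨ (blocks.headD []).length = 0 then [] else  -- Python returns the int 0 here; excluded by Pre_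
    let rows : Int := blocks.length
    let cols : Int := (blocks.headD []).length
    let fuel := 4 * (blocks.length * (blocks.headD []).length + 1)
    ((PySem.List.pyRange 0 (rows * cols) 1).foldl
      (fun (st : PySem.Set (Int × Int) × List Int) idx =>
        let r := PySem.Int.floordiv idx cols
        let c := PySem.Int.mod idx cols
        if cellAt blocks (r, c) = "1" ∧ ¬ PySem.Set.contains st.1 (r, c) then
          let q := floodF fuel blocks rows cols st.1 0 [(r, c)]
          (q.1, st.2 ++ [q.2])
        else st)
      (PySem.Set.empty, [])).2

-- ===== PRECONDITION & SPEC =====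
-- Pre_ excludes empty grids (no rows, or empty first row), where the Python A returns the
-- int 0 instead of a list of areas, and ragged grids with a row shorter than the first row,
-- on which both Pythons raise IndexError.
def Pre_count_islands_with_area (blocks : List (List String)) : Prop :=
  blocks ≠ [] ∧ blocks.headD [] ≠ [] ∧ ∀ row ∈ blocks, (blocks.headD []).length ≤ row.length
instance (blocks : List (List String)) : Decidable (Pre_count_islands_with_area blocks) := by
  unfold Pre_count_islands_with_area; infer_instance

def pvWitness_count_islands_with_area : List (List String) := [["1", "0"], ["0", "1"]]

def Spec_count_islands_with_area (blocks : List (List String)) (out : List Int) : Prop := out = count_islands_with_area_alt blocks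
instance (blocks : List (List String)) (out : List Int) : Decidable (Spec_count_islands_with_area blocks out) := by unfold Spec_count_islands_with_area; infer_instance

-- ===== CLAIM (what is proved, stated in full; the proofs are below) =====
def Claim_equal_count_islands_with_area : Prop := ∀ (blocks : List (List String)), Dom_count_islands_with_area blocks → Pre_count_islands_with_area blocks → Spec_count_islands_with_area blocks (count_islands_with_area blocks)

-- ===== LEMMAS AND PROOFS =====

-- in-bounds cells of the grid
def InB (blocks : List (List String)) (r c : Int) : Prop :=
  0 ≤ r ∧ r < (blocks.length : Int) ∧ 0 ≤ c ∧ c < ((blocks.headD []).length : Int)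

-- the simulation relation between A's visited matrix and B's seen set
def RelVS (blocks : List (List String)) (v : List (List Int)) (S : PySem.Set (Int × Int)) : Prop :=
  ∀ r c, InB blocks r c → ((r, c) ∈ S ↔ vget v r c ≠ 0)

-- number of unvisited cells; the termination/fuel measure
def zeros (v : List (List Int)) : Nat := (v.map (fun row => row.count (0:Int))).sum

-- A's neighbour list at (r,c): the four offsets in A's order, filtered to the grid
def nbrs (blocks : List (List String)) (r c : Int) : List (Int × Int) :=
  ([((0:Int),(1:Int)), (0,-1), (-1,0), (1,0)].map (fun d => (r + d.1, c + d.2))).filter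
    (fun q => decide (0 ≤ q.1 ∧ q.1 < (blocks.length : Int) ∧ 0 ≤ q.2 ∧ q.2 < ((blocks.headD []).length : Int)))

def foldDfs (f : Nat) (blocks : List (List String)) (cells : List (Int × Int))
    (p : List (List Int) × Int) : List (List Int) × Int :=
  cells.foldl (fun p rc => dfsF f blocks p.1 rc.1 rc.2 p.2) p

lemma cellAt_eq (blocks : List (List String)) (r c : Int) :
    cellAt blocks (r, c) = bget blocks r c := by
  unfold cellAt bget
  by_cases h1 : r < 0 ∨ c < 0
  · rw [if_neg (by omega), if_pos h1]
  · rw [if_pos (by omega), if_neg h1]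

lemma nbrs_length_le (blocks : List (List String)) (r c : Int) :
    (nbrs blocks r c).length ≤ 4 := by
  unfold nbrs
  exact le_trans (List.length_filter_le _ _) (by simp)

lemma mem_nbrs_inb (blocks : List (List String)) (r c : Int) (q : Int × Int)
    (h : q ∈ nbrs blocks r c) : InB blocks q.1 q.2 := by
  unfold nbrs at h
  have := (List.mem_filter.mp h).2
  simpa [InB, decide_eq_true_eq] using this

lemma count_set_zero (row : List Int) (cn : Nat) (h : row.getD cn 1 = 0) :
    (row.set cn 1).count 0 + 1 = row.count 0 := by
  induction row generalizing cn with
  | nil => simp at h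
  | cons x xs ih =>
    cases cn with
    | zero => simp at h; subst h; simp
    | succ m =>
      simp at h
      have := ih m h
      simp only [List.set_cons_succ, List.count_cons]
      omega

lemma zeros_cons (a : List Int) (l : List (List Int)) :
    zeros (a :: l) = a.count 0 + zeros l := by simp [zeros]

lemma zeros_set_row (v : List (List Int)) : ∀ (rn : Nat) (row' : List Int),
    row'.count 0 + 1 = (v.getD rn []).count 0 → zeros (v.set rn row') + 1 = zeros v := by
  induction v with
  | nil => intro rn row' h; simp at h
  | cons a l ih =>
    intro rn row' h
    cases rn with
    | zero => simp at h; simp [zeros_cons]; omega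
    | succ m =>
      simp at h
      have := ih m row' h
      simp [zeros_cons]
      omega

lemma zeros_mark (v : List (List Int)) (r c : Int) (h : vget v r c = 0) :
    zeros (mark v r c) + 1 = zeros v := by
  unfold vget at h
  split at h
  · simp at h
  · have hc := count_set_zero (v.getD r.toNat []) c.toNat h
    exact zeros_set_row v r.toNat _ hc

-- marking a 0-cell makes it nonzero, and leaves every other cell unchanged
lemma getD_inrange (v : List (List Int)) (rn : Nat) (cn : Nat)
    (h : (v.getD rn []).getD cn 1 = 0) : rn < v.length ∧ cn < (v.getD rn []).length := by
  by_cases hr : rn < v.length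
  · refine ⟨hr, ?_⟩
    by_cases hc : cn < (v.getD rn []).length
    · exact hc
    · rw [List.getD_eq_getElem?_getD (l := v.getD rn []), List.getElem?_eq_none (by omega)] at h
      simp at h
  · rw [List.getD_eq_getElem?_getD (l := v), List.getElem?_eq_none (by omega)] at h
    simp at h

lemma vget_mark_self (v : List (List Int)) (r c : Int) (h : vget v r c = 0) :
    vget (mark v r c) r c ≠ 0 := by
  unfold vget at h ⊢
  split at h
  · simp at h
  · rename_i hn
    rw [if_neg hn]
    obtain ⟨hr, hc⟩ := getD_inrange v r.toNat c.toNat h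
    unfold mark
    rw [List.getD_eq_getElem?_getD (l := v.set _ _), List.getElem?_set_self hr]
    simp only [Option.getD_some]
    rw [List.getD_eq_getElem?_getD (l := _), List.getElem?_set_self hc]
    simp

lemma vget_mark_other (v : List (List Int)) (r c r' c' : Int)
    (hne : (r', c') ≠ (r, c)) (hr' : 0 ≤ r') (hc' : 0 ≤ c') (hr : 0 ≤ r) (hc : 0 ≤ c) :
    vget (mark v r c) r' c' = vget v r' c' := by
  unfold vget mark
  rw [if_neg (by omega), if_neg (by omega)]
  by_cases hrr : r'.toNat = r.toNat
  · have hrreq : r' = r := by omega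
    have hcc : c'.toNat ≠ c.toNat := by
      have : c' ≠ c := fun hcc' => hne (by rw [hrreq, hcc'])
      omega
    rw [hrr]
    by_cases hlt : r.toNat < v.length
    · rw [List.getD_eq_getElem?_getD (l := v.set _ _), List.getElem?_set_self hlt]
      simp only [Option.getD_some]
      rw [List.getD_eq_getElem?_getD (l := (v.getD r.toNat []).set c.toNat 1),
        List.getElem?_set_ne (by omega), ← List.getD_eq_getElem?_getD]
    · rw [List.set_eq_of_length_le (by omega)]
  · rw [List.getD_eq_getElem?_getD (l := v.set _ _), List.getElem?_set_ne (by omega),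
      ← List.getD_eq_getElem?_getD]

lemma rel_mark (blocks : List (List String)) (v : List (List Int)) (S : PySem.Set (Int × Int))
    (r c : Int) (hrel : RelVS blocks v S) (hin : InB blocks r c) (h0 : vget v r c = 0) :
    RelVS blocks (mark v r c) (S ++ [(r, c)]) := by
  intro r' c' hin'
  by_cases heq : (r', c') = (r, c)
  · rcases Prod.mk.injEq r' c' r c ▸ heq with ⟨hr1, hc1⟩
    subst hr1; subst hc1
    simp [vget_mark_self v r' c' h0]
  · rw [List.mem_append]
    simp only [List.mem_singleton, heq, or_false]
    rw [vget_mark_other v r c r' c' heq hin'.1 hin'.2.2.1 hin.1 hin.2.2.1]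
    exact hrel r' c' hin'

-- the two guards agree across the relation
lemma guard_iff (blocks : List (List String)) (v : List (List Int)) (S : PySem.Set (Int × Int))
    (r c : Int) (hrel : RelVS blocks v S) (hin : InB blocks r c) :
    (PySem.Set.contains S (r, c) = true ∨ cellAt blocks (r, c) = "0")
      ↔ (vget v r c ≠ 0 ∨ bget blocks r c = "0") := by
  rw [cellAt_eq]
  constructor
  · rintro (h | h)
    · exact Or.inl ((hrel r c hin).mp (List.contains_iff_mem.mp h))
    · exact Or.inr h
  · rintro (h | h)
    · exact Or.inl (List.contains_iff_mem.mpr ((hrel r c hin).mpr h))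
    · exact Or.inr h

lemma foldl_mono_meas {α σ : Type} (g : σ → α → σ) (meas : σ → Nat)
    (h : ∀ s a, meas (g s a) ≤ meas s) :
    ∀ (l : List α) (s : σ), meas (List.foldl g s l) ≤ meas s := by
  intro l
  induction l with
  | nil => intro s; simp
  | cons a l ih => intro s; exact le_trans (ih (g s a)) (h s a)

lemma dfs_mono (f : Nat) (blocks : List (List String)) (v : List (List Int)) (r c n : Int) :
    zeros (dfsF f blocks v r c n).1 ≤ zeros v := by
  induction f generalizing v r c n with
  | zero => exact le_refl _
  | succ f ih =>
    simp only [dfsF]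
    split
    · exact le_refl _
    · rename_i hg
      have h0 : vget v r c = 0 := by by_contra hne; exact hg (Or.inl hne)
      have hm := zeros_mark v r c h0
      refine le_trans (foldl_mono_meas _ (fun s : List (List Int) × Int => zeros s.1) ?_ _ _) (by simp only []; omega)
      intro s d
      dsimp only
      split
      · exact le_refl _
      · exact ih _ _ _ _

lemma foldlA_eq (f : Nat) (blocks : List (List String)) (r c : Int) :
    ∀ (ds : List (Int × Int)) (p : List (List Int) × Int),
    ds.foldl (fun (s : List (List Int) × Int) d =>
        let nr := r + d.1
        let nc := c + d.2
        if nr ≥ (blocks.length : Int) ∨ nr < 0 ∨ nc ≥ ((blocks.headD []).length : Int) ∨ nc < 0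
        then s else dfsF f blocks s.1 nr nc s.2) p
      = foldDfs f blocks ((ds.map (fun d => (r + d.1, c + d.2))).filter
          (fun q => decide (0 ≤ q.1 ∧ q.1 < (blocks.length : Int) ∧ 0 ≤ q.2 ∧ q.2 < ((blocks.headD []).length : Int)))) p := by
  intro ds
  induction ds with
  | nil => intro p; simp [foldDfs]
  | cons d ds ih =>
    intro p
    simp only [List.foldl_cons, List.map_cons, List.filter_cons, decide_eq_true_eq]
    by_cases hq : 0 ≤ r + d.1 ∧ r + d.1 < (blocks.length : Int) ∧ 0 ≤ c + d.2 ∧ c + d.2 < ((blocks.headD []).length : Int)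
    · rw [if_neg (by omega), if_pos hq]
      simp only [foldDfs, List.foldl_cons] at *
      exact ih _
    · rw [if_pos (by omega), if_neg hq]
      exact ih _

-- the two step lemmas: both neighbour computations produce the filtered list `nbrs`
lemma dfsA_step (f : Nat) (blocks : List (List String)) (v : List (List Int)) (r c n : Int)
    (h : ¬(vget v r c ≠ 0 ∨ bget blocks r c = "0")) :
    dfsF (f+1) blocks v r c n = foldDfs f blocks (nbrs blocks r c) (mark v r c, n + 1) := by
  simp only [dfsF]
  rw [if_neg h]
  exact foldlA_eq f blocks r c _ _

lemma nbrs_of_inb (blocks : List (List String)) (r c : Int) (hin : InB blocks r c) :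
    nbrs blocks r c
      = (if c + 1 < ((blocks.headD []).length : Int) then [(r, c + 1)] else [])
        ++ (if 0 < c then [(r, c - 1)] else [])
        ++ (if 0 < r then [(r - 1, c)] else [])
        ++ (if r + 1 < (blocks.length : Int) then [(r + 1, c)] else []) := by
  obtain ⟨h1, h2, h3, h4⟩ := hin
  unfold nbrs
  simp only [List.map_cons, List.map_nil, List.filter_cons, List.filter_nil,
    decide_eq_true_eq, add_zero]
  have e1 : (0 ≤ r ∧ r < (blocks.length : Int) ∧ 0 ≤ c + 1 ∧ c + 1 < ((blocks.headD []).length : Int))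
      ↔ c + 1 < ((blocks.headD []).length : Int) := ⟨fun h => h.2.2.2, fun h => ⟨h1, h2, by omega, h⟩⟩
  have e2 : (0 ≤ r ∧ r < (blocks.length : Int) ∧ 0 ≤ c + -1 ∧ c + -1 < ((blocks.headD []).length : Int))
      ↔ 0 < c := ⟨fun h => by omega, fun h => ⟨h1, h2, by omega, by omega⟩⟩
  have e3 : (0 ≤ r + -1 ∧ r + -1 < (blocks.length : Int) ∧ 0 ≤ c ∧ c < ((blocks.headD []).length : Int))
      ↔ 0 < r := ⟨fun h => by omega, fun h => ⟨by omega, by omega, h3, h4⟩⟩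
  have e4 : (0 ≤ r + 1 ∧ r + 1 < (blocks.length : Int) ∧ 0 ≤ c ∧ c < ((blocks.headD []).length : Int))
      ↔ r + 1 < (blocks.length : Int) := ⟨fun h => h.2.1, fun h => ⟨by omega, h, h3, h4⟩⟩
  simp only [e1, e2, e3, e4]
  have hsub1 : c + -1 = c - 1 := by ring
  have hsub2 : r + -1 = r - 1 := by ring
  rw [hsub1, hsub2]
  split_ifs <;> simp

lemma floodB_step (f : Nat) (blocks : List (List String)) (S : PySem.Set (Int × Int))
    (r c n : Int) (stk : List (Int × Int)) (hin : InB blocks r c)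
    (h : ¬(PySem.Set.contains S (r, c) = true ∨ cellAt blocks (r, c) = "0")) :
    floodF (f+1) blocks (blocks.length : Int) ((blocks.headD []).length : Int) S n ((r, c) :: stk)
      = floodF f blocks (blocks.length : Int) ((blocks.headD []).length : Int)
          (S ++ [(r, c)]) (n + 1) (nbrs blocks r c ++ stk) := by
  simp only [floodF]
  rw [if_neg h]
  have hadd : PySem.Set.add S (r, c) = S ++ [(r, c)] := by
    have hnc : ¬ ((r, c) ∈ S) := by
      intro hm
      exact h (Or.inl (List.contains_iff_mem.mpr hm))
    simp [PySem.Set.add, hnc]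
  rw [hadd, nbrs_of_inb blocks r c hin]
  congr 1
  dsimp only
  simp only [List.headD_eq_head?_getD]
  split_ifs <;> simp_all

lemma foldDfs_fuel_aux (z f g : Nat) (blocks : List (List String))
    (hdfs : ∀ (v : List (List Int)) (r c n : Int), zeros v ≤ z →
      dfsF f blocks v r c n = dfsF g blocks v r c n) :
    ∀ (cells : List (Int × Int)) (p : List (List Int) × Int), zeros p.1 ≤ z →
    foldDfs f blocks cells p = foldDfs g blocks cells p := by
  intro cells
  induction cells with
  | nil => intro p hp; rfl
  | cons q cells ih =>
    intro p hp
    simp only [foldDfs, List.foldl_cons] at *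
    rw [hdfs p.1 q.1 q.2 p.2 hp]
    exact ih _ (le_trans (dfs_mono g blocks p.1 q.1 q.2 p.2) hp)

lemma dfsF_fuel (z : Nat) : ∀ (f g : Nat) (blocks : List (List String)) (v : List (List Int))
    (r c n : Int), zeros v ≤ z → z < f → z < g →
    dfsF f blocks v r c n = dfsF g blocks v r c n := by
  induction z using Nat.strong_induction_on with
  | _ z ihz =>
    intro f g blocks v r c n hz hf hg
    obtain ⟨f', rfl⟩ : ∃ k, f = k + 1 := ⟨f - 1, by omega⟩
    obtain ⟨g', rfl⟩ : ∃ k, g = k + 1 := ⟨g - 1, by omega⟩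
    by_cases hguard : vget v r c ≠ 0 ∨ bget blocks r c = "0"
    · simp only [dfsF]; rw [if_pos hguard, if_pos hguard]
    · rw [dfsA_step f' blocks v r c n hguard, dfsA_step g' blocks v r c n hguard]
      have h0 : vget v r c = 0 := by by_contra hne; exact hguard (Or.inl hne)
      have hm := zeros_mark v r c h0
      have hz1 : 1 ≤ zeros v := by omega
      have hdfs : ∀ (v' : List (List Int)) (r' c' n' : Int), zeros v' ≤ z - 1 →
          dfsF f' blocks v' r' c' n' = dfsF g' blocks v' r' c' n' :=
        fun v' r' c' n' hv' =>
          ihz (z - 1) (by omega) f' g' blocks v' r' c' n' hv' (by omega) (by omega)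
      exact foldDfs_fuel_aux (z - 1) f' g' blocks hdfs _ _ (by simp only []; omega)

lemma foldDfs_fuel (cells : List (Int × Int)) (z f g : Nat) (blocks : List (List String))
    (p : List (List Int) × Int) (hp : zeros p.1 ≤ z) (hf : z < f) (hg : z < g) :
    foldDfs f blocks cells p = foldDfs g blocks cells p := by
  exact foldDfs_fuel_aux z f g blocks
    (fun v r c n hv => dfsF_fuel z f g blocks v r c n hv hf hg) cells p hp

-- fuel irrelevance for B's loop, measured through the related matrix
lemma floodF_fuel (m : Nat) : ∀ (f g : Nat) (blocks : List (List String))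
    (v : List (List Int)) (S : PySem.Set (Int × Int)) (n : Int) (s : List (Int × Int)),
    RelVS blocks v S → (∀ p ∈ s, InB blocks p.1 p.2) → s.length + 5 * zeros v ≤ m →
    s.length + 4 * zeros v < f → s.length + 4 * zeros v < g →
    floodF f blocks (blocks.length : Int) ((blocks.headD []).length : Int) S n s
      = floodF g blocks (blocks.length : Int) ((blocks.headD []).length : Int) S n s := by
  induction m using Nat.strong_induction_on with
  | _ m ihm =>
    intro f g blocks v S n s hrel hsin hm hf hg
    obtain ⟨f', rfl⟩ : ∃ k, f = k + 1 := ⟨f - 1, by omega⟩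
    obtain ⟨g', rfl⟩ : ∃ k, g = k + 1 := ⟨g - 1, by omega⟩
    match s with
    | [] => rfl
    | (r, c) :: s' =>
      simp only [List.length_cons] at hm hf hg
      have hin : InB blocks r c := hsin (r, c) List.mem_cons_self
      have hsin' : ∀ p ∈ s', InB blocks p.1 p.2 :=
        fun p hp => hsin p (List.mem_cons_of_mem _ hp)
      by_cases hguard : PySem.Set.contains S (r, c) = true ∨ cellAt blocks (r, c) = "0"
      · simp only [floodF]
        rw [if_pos hguard, if_pos hguard]
        exact ihm (m - 1) (by omega) f' g' blocks v S n s' hrel hsin' (by omega) (by omega) (by omega)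
      · rw [floodB_step f' blocks S r c n s' hin hguard,
          floodB_step g' blocks S r c n s' hin hguard]
        have h0 : vget v r c = 0 := by
          by_contra hne
          exact hguard ((guard_iff blocks v S r c hrel hin).mpr (Or.inl hne))
        have hzm := zeros_mark v r c h0
        have hn := nbrs_length_le blocks r c
        refine ihm (m - 1) (by omega) f' g' blocks (mark v r c) (S ++ [(r, c)]) (n + 1)
          (nbrs blocks r c ++ s') (rel_mark blocks v S r c hrel hin h0) ?_ ?_ ?_ ?_
        · intro p hp
          rcases List.mem_append.mp hp with h | h
          · exact mem_nbrs_inb blocks r c p h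
          · exact hsin' p h
        all_goals rw [List.length_append]; omega

-- the bridge: draining A's pending cell list equals running B's stack on those cells
lemma bridge (z : Nat) : ∀ (cells : List (Int × Int)) (blocks : List (List String))
    (v : List (List Int)) (S : PySem.Set (Int × Int)) (n : Int) (s : List (Int × Int))
    (fA fB : Nat),
    RelVS blocks v S → (∀ p ∈ cells, InB blocks p.1 p.2) → (∀ p ∈ s, InB blocks p.1 p.2) →
    zeros v ≤ z → zeros v < fA → s.length + cells.length + 4 * zeros v < fB →
    ∃ S', RelVS blocks (foldDfs fA blocks cells (v, n)).1 S' ∧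
      floodF fB blocks (blocks.length : Int) ((blocks.headD []).length : Int) S n (cells ++ s)
        = floodF (s.length + 4 * zeros (foldDfs fA blocks cells (v, n)).1 + 1) blocks
            (blocks.length : Int) ((blocks.headD []).length : Int) S'
            (foldDfs fA blocks cells (v, n)).2 s := by
  induction z using Nat.strong_induction_on with
  | _ z ihz =>
    intro cells
    induction cells with
    | nil =>
      intro blocks v S n s fA fB hrel hcin hsin hz hfA hfB
      refine ⟨S, hrel, ?_⟩
      simp only [foldDfs, List.foldl_nil, List.nil_append] at *
      exact floodF_fuel (s.length + 5 * zeros v) fB (s.length + 4 * zeros v + 1) blocks v S n s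
        hrel hsin (le_refl _) (by omega) (by omega)
    | cons rc cells ihc =>
      intro blocks v S n s fA fB hrel hcin hsin hz hfA hfB
      obtain ⟨r, c⟩ := rc
      have hin : InB blocks r c := hcin (r, c) List.mem_cons_self
      have hcin' : ∀ p ∈ cells, InB blocks p.1 p.2 :=
        fun p hp => hcin p (List.mem_cons_of_mem _ hp)
      simp only [List.length_cons] at hfB
      obtain ⟨fB', rfl⟩ : ∃ k, fB = k + 1 := ⟨fB - 1, by omega⟩
      obtain ⟨fA', rfl⟩ : ∃ k, fA = k + 1 := ⟨fA - 1, by omega⟩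
      by_cases hguard : vget v r c ≠ 0 ∨ bget blocks r c = "0"
      · have hBg : PySem.Set.contains S (r, c) = true ∨ cellAt blocks (r, c) = "0" :=
          (guard_iff blocks v S r c hrel hin).mpr hguard
        have hA : dfsF (fA' + 1) blocks v r c n = (v, n) := by
          simp only [dfsF]; rw [if_pos hguard]
        have hhd : foldDfs (fA' + 1) blocks ((r, c) :: cells) (v, n)
            = foldDfs (fA' + 1) blocks cells (v, n) := by
          simp only [foldDfs, List.foldl_cons]
          rw [show dfsF (fA' + 1) blocks (v, n).1 r c (v, n).2 = (v, n) from hA]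
        have hL : floodF (fB' + 1) blocks (blocks.length : Int) ((blocks.headD []).length : Int)
            S n ((r, c) :: (cells ++ s))
            = floodF fB' blocks (blocks.length : Int) ((blocks.headD []).length : Int)
                S n (cells ++ s) := by
          simp only [floodF]; rw [if_pos hBg]
        rw [List.cons_append, hL, hhd]
        exact ihc blocks v S n s (fA' + 1) fB' hrel hcin' hsin hz hfA (by omega)
      · have hBg : ¬(PySem.Set.contains S (r, c) = true ∨ cellAt blocks (r, c) = "0") :=
          fun hb => hguard ((guard_iff blocks v S r c hrel hin).mp hb)
        have h0 : vget v r c = 0 := by by_contra hne; exact hguard (Or.inl hne)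
        have hzm := zeros_mark v r c h0
        have hn := nbrs_length_le blocks r c
        have hstep : foldDfs (fA' + 1) blocks ((r, c) :: cells) (v, n)
            = foldDfs (fA' + 1) blocks (nbrs blocks r c ++ cells) (mark v r c, n + 1) := by
          simp only [foldDfs, List.foldl_cons]
          rw [show dfsF (fA' + 1) blocks (v, n).1 r c (v, n).2
              = foldDfs fA' blocks (nbrs blocks r c) (mark v r c, n + 1) from
            dfsA_step fA' blocks v r c n hguard]
          rw [foldDfs_fuel (nbrs blocks r c) (zeros (mark v r c)) fA' (fA' + 1) blocks _
            (le_refl _) (by omega) (by omega)]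
          simp [foldDfs, List.foldl_append]
        rw [hstep, List.cons_append,
          floodB_step fB' blocks S r c n (cells ++ s) hin hBg, ← List.append_assoc]
        refine ihz (z - 1) (by omega) (nbrs blocks r c ++ cells) blocks (mark v r c)
          (S ++ [(r, c)]) (n + 1) s (fA' + 1) fB'
          (rel_mark blocks v S r c hrel hin h0) ?_ hsin (by omega) (by omega)
          (by rw [List.length_append]; omega)
        intro p hp
        rcases List.mem_append.mp hp with h | h
        · exact mem_nbrs_inb blocks r c p h
        · exact hcin' p h

-- B's while-loop on an empty stack returns immediately, whatever the fuel
lemma floodF_nil (f : Nat) (blocks : List (List String)) (R C : Int)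
    (S : PySem.Set (Int × Int)) (n : Int) :
    floodF f blocks R C S n [] = (S, n) := by
  cases f <;> rfl

lemma zeros_replicate (rows cols : Nat) :
    zeros (List.replicate rows (List.replicate cols (0:Int))) = rows * cols := by
  simp [zeros, List.map_replicate, List.sum_replicate, smul_eq_mul]

lemma vget_init (rows cols : Nat) (r c : Int) (hr : 0 ≤ r) (hrlt : r < (rows : Int))
    (hc : 0 ≤ c) (hclt : c < (cols : Int)) :
    vget (List.replicate rows (List.replicate cols (0:Int))) r c = 0 := by
  unfold vget
  rw [if_neg (by omega),
    List.getD_eq_getElem?_getD (l := List.replicate rows (List.replicate cols (0:Int))),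
    List.getElem?_replicate, if_pos (by omega)]
  simp only [Option.getD_some]
  rw [List.getD_eq_getElem?_getD (l := List.replicate cols (0:Int)),
    List.getElem?_replicate, if_pos (by omega)]
  rfl

-- relational fold congruence, with membership
lemma foldl_rel {α σ τ : Type} (R : σ → τ → Prop) (f : σ → α → σ) (g : τ → α → τ)
    (l : List α) (h : ∀ s t a, a ∈ l → R s t → R (f s a) (g t a)) :
    ∀ (s : σ) (t : τ), R s t → R (l.foldl f s) (l.foldl g t) := by
  induction l with
  | nil => intro s t hst; exact hst
  | cons a l ih =>
    intro s t hst
    exact ih (fun s t b hb => h s t b (List.mem_cons_of_mem a hb)) _ _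
      (h s t a List.mem_cons_self hst)

-- B's flat index list, decoded by divmod, is the row-major list of cells
lemma range_divmod (R C : Nat) (hC : 0 < C) :
    (List.range (R * C)).map (fun i => ((i / C : Nat), (i % C : Nat)))
      = (List.range R).flatMap (fun r => (List.range C).map (fun c => (r, c))) := by
  induction R with
  | zero => simp
  | succ R ih =>
    rw [Nat.succ_mul, List.range_add, List.map_append, ih, List.range_add,
      List.flatMap_append]
    congr 1
    simp only [List.range_one, List.map_cons, List.map_nil, add_zero, List.flatMap_cons,
      List.flatMap_nil, List.append_nil, List.map_map]
    refine List.map_congr_left ?_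
    intro c hc
    have hclt := List.mem_range.mp hc
    simp only [Function.comp_apply]
    have h1 : (R * C + c) / C = R := by
      rw [Nat.mul_comm, Nat.mul_add_div hC, Nat.div_eq_of_lt hclt, Nat.add_zero]
    have h2 : (R * C + c) % C = c := by
      rw [Nat.mul_comm, Nat.mul_add_mod, Nat.mod_eq_of_lt hclt]
    rw [h1, h2]

-- the two loop bodies at one seed cell preserve the simulation relation
lemma cell_step (blocks : List (List String)) (stA : List (List Int) × List Int)
    (stB : PySem.Set (Int × Int) × List Int) (r c : Int)
    (hin : InB blocks r c) (h2 : stA.2 = stB.2) (hrel : RelVS blocks stA.1 stB.1)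
    (hz : zeros stA.1 ≤ blocks.length * (blocks.headD []).length) :
    (if bget blocks r c = "1" ∧ vget stA.1 r c = 0 then
        ((dfsF (blocks.length * (blocks.headD []).length + 1) blocks stA.1 r c 0).1,
         stA.2 ++ [(dfsF (blocks.length * (blocks.headD []).length + 1) blocks stA.1 r c 0).2])
      else stA).2
      = (if cellAt blocks (r, c) = "1" ∧ ¬ PySem.Set.contains stB.1 (r, c) then
          ((floodF (4 * (blocks.length * (blocks.headD []).length + 1)) blocks
              (blocks.length : Int) ((blocks.headD []).length : Int) stB.1 0 [(r, c)]).1,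
           stB.2 ++ [(floodF (4 * (blocks.length * (blocks.headD []).length + 1)) blocks
              (blocks.length : Int) ((blocks.headD []).length : Int) stB.1 0 [(r, c)]).2])
        else stB).2
    ∧ RelVS blocks
        (if bget blocks r c = "1" ∧ vget stA.1 r c = 0 then
          ((dfsF (blocks.length * (blocks.headD []).length + 1) blocks stA.1 r c 0).1,
           stA.2 ++ [(dfsF (blocks.length * (blocks.headD []).length + 1) blocks stA.1 r c 0).2])
        else stA).1
        (if cellAt blocks (r, c) = "1" ∧ ¬ PySem.Set.contains stB.1 (r, c) then
          ((floodF (4 * (blocks.length * (blocks.headD []).length + 1)) blocks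
              (blocks.length : Int) ((blocks.headD []).length : Int) stB.1 0 [(r, c)]).1,
           stB.2 ++ [(floodF (4 * (blocks.length * (blocks.headD []).length + 1)) blocks
              (blocks.length : Int) ((blocks.headD []).length : Int) stB.1 0 [(r, c)]).2])
        else stB).1
    ∧ zeros (if bget blocks r c = "1" ∧ vget stA.1 r c = 0 then
          ((dfsF (blocks.length * (blocks.headD []).length + 1) blocks stA.1 r c 0).1,
           stA.2 ++ [(dfsF (blocks.length * (blocks.headD []).length + 1) blocks stA.1 r c 0).2])
        else stA).1 ≤ blocks.length * (blocks.headD []).length := by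
  have hgiff : (cellAt blocks (r, c) = "1" ∧ ¬ PySem.Set.contains stB.1 (r, c))
      ↔ (bget blocks r c = "1" ∧ vget stA.1 r c = 0) := by
    rw [cellAt_eq]
    constructor
    · rintro ⟨hb, hnc⟩
      refine ⟨hb, ?_⟩
      by_contra hne
      exact hnc (List.contains_iff_mem.mpr ((hrel r c hin).mpr hne))
    · rintro ⟨hb, h0⟩
      refine ⟨hb, fun hc => ?_⟩
      exact absurd ((hrel r c hin).mp (List.contains_iff_mem.mp hc)) (by simp [h0])
  by_cases hg : bget blocks r c = "1" ∧ vget stA.1 r c = 0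
  · rw [if_pos hg, if_pos (hgiff.mpr hg)]
    obtain ⟨S', hS', heq⟩ := bridge (zeros stA.1) [(r, c)] blocks stA.1 stB.1 0 []
      (blocks.length * (blocks.headD []).length + 1)
      (4 * (blocks.length * (blocks.headD []).length + 1))
      hrel (by intro p hp; simp at hp; rw [hp]; exact hin) (by intro p hp; simp at hp)
      (le_refl _) (by omega) (by simp only [List.length_nil, List.length_cons]; omega)
    have hfold : foldDfs (blocks.length * (blocks.headD []).length + 1) blocks [(r, c)]
        (stA.1, 0) = dfsF (blocks.length * (blocks.headD []).length + 1) blocks stA.1 r c 0 := by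
      simp [foldDfs]
    rw [hfold] at hS' heq
    simp only [List.append_nil, List.length_nil, Nat.zero_add, floodF_nil] at heq
    rw [heq]
    refine ⟨by rw [h2], hS', ?_⟩
    exact le_trans (dfs_mono _ blocks stA.1 r c 0) hz
  · rw [if_neg hg, if_neg (fun hb => hg (hgiff.mp hb))]
    exact ⟨h2, hrel, hz⟩

-- py-range nested loops are List.range nested loops
lemma pyfold_nested {σ : Type} (R C : Nat) (H : σ → Int → Int → σ) (init : σ) :
    (PySem.List.pyRange 0 (R : Int) 1).foldl
      (fun st r => (PySem.List.pyRange 0 (C : Int) 1).foldl (fun st c => H st r c) st) init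
      = (List.range R).foldl
          (fun st (r : Nat) => (List.range C).foldl (fun st (c : Nat) => H st (r : Int) (c : Int)) st) init := by
  simp only [PySem.List.pyRange_zero_nat, List.foldl_map]

-- B's flat divmod loop is the same nested loop
lemma flat_eq_nested {σ : Type} (R C : Nat) (hC : 0 < C) (H : σ → Int → Int → σ) (init : σ) :
    (PySem.List.pyRange 0 ((R : Int) * (C : Int)) 1).foldl
      (fun st idx => H st (PySem.Int.floordiv idx (C : Int)) (PySem.Int.mod idx (C : Int))) init
      = (List.range R).foldl
          (fun st (r : Nat) => (List.range C).foldl (fun st (c : Nat) => H st (r : Int) (c : Int)) st) init := by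
  have hcast : (R : Int) * (C : Int) = ((R * C : Nat) : Int) := by push_cast; ring
  rw [hcast, PySem.List.pyRange_zero_nat, List.foldl_map]
  simp only [PySem.Int.floordiv_natCast, PySem.Int.mod_natCast]
  have h1 : (List.range (R * C)).foldl (fun st i => H st ((i / C : Nat) : Int) ((i % C : Nat) : Int)) init
      = ((List.range (R * C)).map (fun i => ((i / C : Nat), (i % C : Nat)))).foldl
          (fun st q => H st (q.1 : Int) (q.2 : Int)) init := by
    rw [List.foldl_map]
  rw [h1, range_divmod R C hC, List.foldl_flatMap]
  simp only [List.foldl_map]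

-- ===== VERDICT (by name: the statement is the Claim_ definition above) =====
theorem count_islands_with_area_spec : Claim_equal_count_islands_with_area := by
  intro blocks hdom hpre
  unfold Spec_count_islands_with_area
  obtain ⟨hne, hhd, -⟩ := hpre
  obtain ⟨h, t, rfl⟩ : ∃ h t, blocks = h :: t := by
    cases blocks with
    | nil => exact absurd rfl hne
    | cons a b => exact ⟨a, b, rfl⟩
  have hh : h ≠ [] := by simpa using hhd
  have hC0 : 0 < h.length := List.length_pos_iff.mpr hh
  simp only [count_islands_with_area, count_islands_with_area_alt, List.headD_cons]
  rw [if_neg (by omega), if_neg (by simp only [List.length_cons]; omega)]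
  refine Eq.trans (congrArg Prod.snd (pyfold_nested (h :: t).length h.length
      (fun st r c =>
        if bget (h :: t) r c = "1" ∧ vget st.1 r c = 0 then
          (((dfsF ((h :: t).length * h.length + 1) (h :: t) st.1 r c 0).1,
            st.2 ++ [(dfsF ((h :: t).length * h.length + 1) (h :: t) st.1 r c 0).2]) :
              List (List Int) × List Int)
        else st)
      (List.replicate (h :: t).length (List.replicate h.length (0:Int)), []))) ?_
  refine Eq.trans ?_ (congrArg Prod.snd (flat_eq_nested (h :: t).length h.length hC0
      (fun st r c =>
        if cellAt (h :: t) (r, c) = "1" ∧ ¬ PySem.Set.contains st.1 (r, c) then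
          (((floodF (4 * ((h :: t).length * h.length + 1)) (h :: t)
              ((h :: t).length : Int) (h.length : Int) st.1 0 [(r, c)]).1,
            st.2 ++ [(floodF (4 * ((h :: t).length * h.length + 1)) (h :: t)
              ((h :: t).length : Int) (h.length : Int) st.1 0 [(r, c)]).2]) :
              PySem.Set (Int × Int) × List Int)
        else st)
      (PySem.Set.empty, []))).symm
  have hrel0 : RelVS (h :: t)
      (List.replicate (h :: t).length (List.replicate h.length (0:Int))) PySem.Set.empty := by
    intro r c hin
    obtain ⟨h1, h2, h3, h4⟩ := hin
    have hv := vget_init (h :: t).length h.length r c h1 h2 h3 (by simpa using h4)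
    simp [PySem.Set.empty]
    simpa using hv
  have hmain := foldl_rel
    (fun (sA : List (List Int) × List Int) (sB : PySem.Set (Int × Int) × List Int) =>
      sA.2 = sB.2 ∧ RelVS (h :: t) sA.1 sB.1 ∧ zeros sA.1 ≤ (h :: t).length * h.length)
    (fun st (r : Nat) => (List.range h.length).foldl
      (fun st (c : Nat) =>
        if bget (h :: t) (r : Int) (c : Int) = "1" ∧ vget st.1 (r : Int) (c : Int) = 0 then
          (((dfsF ((h :: t).length * h.length + 1) (h :: t) st.1 (r : Int) (c : Int) 0).1,
            st.2 ++ [(dfsF ((h :: t).length * h.length + 1) (h :: t) st.1 (r : Int) (c : Int) 0).2]) :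
              List (List Int) × List Int)
        else st) st)
    (fun st (r : Nat) => (List.range h.length).foldl
      (fun st (c : Nat) =>
        if cellAt (h :: t) ((r : Int), (c : Int)) = "1" ∧ ¬ PySem.Set.contains st.1 ((r : Int), (c : Int)) then
          (((floodF (4 * ((h :: t).length * h.length + 1)) (h :: t)
              ((h :: t).length : Int) (h.length : Int) st.1 0 [((r : Int), (c : Int))]).1,
            st.2 ++ [(floodF (4 * ((h :: t).length * h.length + 1)) (h :: t)
              ((h :: t).length : Int) (h.length : Int) st.1 0 [((r : Int), (c : Int))]).2]) :
              PySem.Set (Int × Int) × List Int)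
        else st) st)
    (List.range (h :: t).length)
    (by
      intro sA sB r hrmem hst
      have hrlt := List.mem_range.mp hrmem
      refine foldl_rel
        (fun (sA : List (List Int) × List Int) (sB : PySem.Set (Int × Int) × List Int) =>
          sA.2 = sB.2 ∧ RelVS (h :: t) sA.1 sB.1 ∧ zeros sA.1 ≤ (h :: t).length * h.length)
        _ _ (List.range h.length) ?_ sA sB hst
      intro sA sB c hcmem hst'
      have hclt := List.mem_range.mp hcmem
      have hin : InB (h :: t) (r : Int) (c : Int) :=
        ⟨Int.natCast_nonneg r, by exact_mod_cast hrlt, Int.natCast_nonneg c, by exact_mod_cast hclt⟩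
      exact cell_step (h :: t) sA sB (r : Int) (c : Int) hin hst'.1 hst'.2.1 hst'.2.2)
    (List.replicate (h :: t).length (List.replicate h.length (0:Int)), [])
    (PySem.Set.empty, [])
    ⟨rfl, hrel0, le_of_eq (zeros_replicate (h :: t).length h.length)⟩
  exact hmain.1
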